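-- pv_equiv track=rewrite | github.com/peterhadda/job-market-bot | src/models/clustering.py | auto_label_clusters
-- ===== SOURCE A (Python) =====
-- LABEL_KEYWORDS = {
--     "Data Analyst / BI": {
--         "sql", "excel", "power bi", "tableau", "dashboard", "reporting", "kpi", "analysis", "visualization"
--     },
--     "ML / AI": {
--         "pytorch", "tensorflow", "transformers", "deep learning", "machine learning", "nlp",
--         "model", "training", "classification", "regression"
--     },
--     "Data Engineering": {
--         "etl", "elt", "airflow", "spark", "kafka", "dbt", "warehouse", "pipeline", "bigquery",
--         "snowflake", "redshift"
--     },
--     "Customer / Business": {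
--         "customer service", "sales", "client", "communication", "stakeholder", "support",
--         "account", "crm", "marketing"
--     },
-- }
--
-- def auto_label_clusters(cluster_terms, label_keywords=LABEL_KEYWORDS, fallback_prefix="Cluster"):
--     """
--     cluster_terms format:
--       { cluster_id: [(term1, weight1), (term2, weight2), ...] }
--
--     Returns:
--       { cluster_id: "Label Name" }
--     """
--     cluster_labels = {}
--
--     for cluster_id, term_weights in cluster_terms.items():
--         # keep only terms, normalize to lowercase
--         terms = [t.lower() for (t, _) in term_weights]
--
--         best_label = None
--         best_score = -1
--
--         for label, keywords in label_keywords.items():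
--             # score = how many keywords appear in the cluster's top terms
--             score = sum(1 for kw in keywords if kw in terms)
--
--             if score > best_score:
--                 best_score = score
--                 best_label = label
--
--         # if nothing matched, use fallback
--         if best_score <= 0:
--             cluster_labels[cluster_id] = f"{fallback_prefix} {cluster_id}"
--         else:
--             cluster_labels[cluster_id] = best_label
--
--     return cluster_labels
-- ===== SOURCE B (Python) =====
-- LABEL_KEYWORDS = {
--     "Data Analyst / BI": {
--         "sql", "excel", "power bi", "tableau", "dashboard", "reporting", "kpi", "analysis", "visualization"
--     },
--     "ML / AI": {
--         "pytorch", "tensorflow", "transformers", "deep learning", "machine learning", "nlp",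
--         "model", "training", "classification", "regression"
--     },
--     "Data Engineering": {
--         "etl", "elt", "airflow", "spark", "kafka", "dbt", "warehouse", "pipeline", "bigquery",
--         "snowflake", "redshift"
--     },
--     "Customer / Business": {
--         "customer service", "sales", "client", "communication", "stakeholder", "support",
--         "account", "crm", "marketing"
--     },
-- }
--
-- def auto_label_clusters(cluster_terms, label_keywords=LABEL_KEYWORDS, fallback_prefix="Cluster"):
--     # Inverted index: keyword -> labels whose keyword set contains it (built once).
--     index = {}
--     for label, kws in label_keywords.items():
--         for kw in kws:
--             index.setdefault(kw, []).append(label)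
--
--     cluster_labels = {}
--     for cluster_id, term_weights in cluster_terms.items():
--         # unique lowercased terms; scores are order-independent sums, so set
--         # iteration order cannot affect the result
--         terms = {t.lower() for (t, _) in term_weights}
--         scores = {label: 0 for label in label_keywords}
--         for t in terms:
--             for lab in index.get(t, []):
--                 scores[lab] += 1
--         best, best_label = 0, None
--         for label in label_keywords:
--             if scores[label] > best:
--                 best, best_label = scores[label], label
--         cluster_labels[cluster_id] = (
--             best_label if best_label is not None else f"{fallback_prefix} {cluster_id}"
--         )
--     return cluster_labels
-- ===== Notes on version B (the rewrite author's own statement) =====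
-- stated objective: faster
-- what changed: Replaces the per-cluster label-by-keyword nested scan (with a list membership test per keyword) by an inverted keyword->labels index built once, a per-cluster set of unique lowercased terms, and a term-driven score counter per label; ties still resolve to the earliest label and a best score <= 0 still falls back; the Lean Pre_ only excludes association lists whose label keys repeat, which no Python dict argument can represent.
import Mathlib
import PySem

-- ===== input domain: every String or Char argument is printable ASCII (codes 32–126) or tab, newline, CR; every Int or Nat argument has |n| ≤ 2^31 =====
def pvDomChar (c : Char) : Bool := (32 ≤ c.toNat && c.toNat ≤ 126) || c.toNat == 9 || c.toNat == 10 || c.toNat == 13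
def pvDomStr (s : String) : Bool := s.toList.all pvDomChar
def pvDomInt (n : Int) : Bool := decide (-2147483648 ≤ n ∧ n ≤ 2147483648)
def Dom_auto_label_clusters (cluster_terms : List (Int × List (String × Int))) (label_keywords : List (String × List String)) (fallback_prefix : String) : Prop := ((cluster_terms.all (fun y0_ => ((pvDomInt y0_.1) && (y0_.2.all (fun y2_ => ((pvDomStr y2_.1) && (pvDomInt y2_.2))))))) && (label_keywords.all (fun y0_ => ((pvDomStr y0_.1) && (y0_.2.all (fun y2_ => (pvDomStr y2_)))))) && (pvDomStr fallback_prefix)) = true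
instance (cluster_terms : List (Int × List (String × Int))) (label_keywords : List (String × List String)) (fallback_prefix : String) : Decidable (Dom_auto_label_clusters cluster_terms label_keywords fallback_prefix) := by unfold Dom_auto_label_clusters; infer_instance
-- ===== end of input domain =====

-- B replaces A's per-cluster label×keyword scan by a keyword→labels inverted index
-- built once plus a term-driven score counter per label (measured faster).


-- ===== PORT A =====
def auto_label_clusters (cluster_terms : List (Int × List (String × Int))) (label_keywords : List (String × List String)) (fallback_prefix : String) : List (Int × String) :=
  (cluster_terms.foldl (fun cluster_labels ct =>
      -- terms = [t.lower() for (t, _) in term_weights]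
      let terms := ct.2.map (fun p => PySem.Str.lower p.1)
      -- for label, keywords in label_keywords.items(): running (best_score, best_label)
      let r := label_keywords.foldl (fun bs p =>
          -- score = sum(1 for kw in keywords if kw in terms)
          let score : Int := p.2.foldl (fun s kw => if terms.contains kw then s + 1 else s) 0
          if score > bs.1 then (score, some p.1) else bs)
        ((-1 : Int), (none : Option String))
      if r.1 ≤ 0 then
        cluster_labels.insert ct.1 (fallback_prefix ++ " " ++ PySem.Int.toStr ct.1)
      else
        -- best_score > 0 forces best_label = Some _; the "" default is unreachable
        cluster_labels.insert ct.1 (r.2.getD ""))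
    (PySem.Dict.empty : PySem.Dict Int String)).items

-- ===== PORT B =====
def auto_label_clusters_alt (cluster_terms : List (Int × List (String × Int))) (label_keywords : List (String × List String)) (fallback_prefix : String) : List (Int × String) :=
  -- index.setdefault(kw, []).append(label)  ==  index[kw] = index.get(kw, []) + [label]
  let index : PySem.Dict String (List String) :=
    label_keywords.foldl (fun d p => p.2.foldl (fun d kw => d.modify kw [] (· ++ [p.1])) d)
      PySem.Dict.empty
  (cluster_terms.foldl (fun cluster_labels ct =>
      -- terms = {t.lower() for (t, _) in term_weights}
      let ts : PySem.Set String := PySem.Set.ofList (ct.2.map (fun p => PySem.Str.lower p.1))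
      -- scores = {label: 0 for label in label_keywords}
      let scores0 : PySem.Dict String Int := label_keywords.foldl (fun d p => d.insert p.1 (0 : Int)) PySem.Dict.empty
      -- for t in terms: for lab in index.get(t, []): scores[lab] += 1
      -- (lab is always an initialized key; scores built commutatively, so the
      --  Python set-iteration order over `terms` cannot affect any lookup)
      let scores := ts.foldl (fun d t =>
          (index.getD t []).foldl (fun d lab => d.modify lab 0 (· + 1)) d) scores0
      -- best, best_label = 0, None; first strict improvement wins ties
      let r := label_keywords.foldl (fun bs p =>
          if scores.getD p.1 0 > bs.1 then (scores.getD p.1 0, some p.1) else bs)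
        ((0 : Int), (none : Option String))
      cluster_labels.insert ct.1 (r.2.getD (fallback_prefix ++ " " ++ PySem.Int.toStr ct.1)))
    (PySem.Dict.empty : PySem.Dict Int String)).items

-- ===== PRECONDITION & SPEC =====
-- Pre_ excludes association lists whose label keys repeat: a Python dict cannot
-- have duplicate keys, so such lists represent no input of the Python programs.
def Pre_auto_label_clusters (cluster_terms : List (Int × List (String × Int))) (label_keywords : List (String × List String)) (fallback_prefix : String) : Prop :=
  (label_keywords.map Prod.fst).Nodup
instance (cluster_terms : List (Int × List (String × Int))) (label_keywords : List (String × List String)) (fallback_prefix : String) : Decidable (Pre_auto_label_clusters cluster_terms label_keywords fallback_prefix) := by unfold Pre_auto_label_clusters; infer_instance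
def pvWitness_auto_label_clusters : (List (Int × List (String × Int))) × (List (String × List String)) × String :=
  ([(1, [("SQL", 3), ("excel", 2)]), (2, [("dog", 1)])],
   [("Data Analyst / BI", ["sql", "excel"]), ("ML / AI", ["pytorch", "nlp"])],
   "Cluster")

def Spec_auto_label_clusters (cluster_terms : List (Int × List (String × Int))) (label_keywords : List (String × List String)) (fallback_prefix : String) (out : List (Int × String)) : Prop := out = auto_label_clusters_alt cluster_terms label_keywords fallback_prefix
instance (cluster_terms : List (Int × List (String × Int))) (label_keywords : List (String × List String)) (fallback_prefix : String) (out : List (Int × String)) : Decidable (Spec_auto_label_clusters cluster_terms label_keywords fallback_prefix out) := by unfold Spec_auto_label_clusters; infer_instance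

-- ===== CLAIM (what is proved, stated in full; the proofs are below) =====
def Claim_equal_auto_label_clusters : Prop := ∀ (cluster_terms : List (Int × List (String × Int))) (label_keywords : List (String × List String)) (fallback_prefix : String), Dom_auto_label_clusters cluster_terms label_keywords fallback_prefix → Pre_auto_label_clusters cluster_terms label_keywords fallback_prefix → Spec_auto_label_clusters cluster_terms label_keywords fallback_prefix (auto_label_clusters cluster_terms label_keywords fallback_prefix)

-- ===== LEMMAS AND PROOFS =====

-- A's per-label score of a (label, keywords) entry against a term list
def scoreA (terms : List String) (p : String × List String) : Int :=
  p.2.foldl (fun s kw => if terms.contains kw then s + 1 else s) 0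

-- the shared best-scan fold
def pick (f : String × List String → Int) (init : Int × Option String)
    (lks : List (String × List String)) : Int × Option String :=
  lks.foldl (fun bs p => if f p > bs.1 then (f p, some p.1) else bs) init

-- per-label keyword count contributed by an association list (duplicate-label aware)
def kwCount (lks : List (String × List String)) (t l : String) : Nat :=
  (lks.map (fun p => if p.1 = l then p.2.count t else 0)).sum

theorem pick_cons (f : String × List String → Int) (init : Int × Option String)
    (p : String × List String) (t : List (String × List String)) :
    pick f init (p :: t) = pick f (if f p > init.1 then (f p, some p.1) else init) t := rfl

theorem pick_mono (f : String × List String → Int) (lks : List (String × List String)) :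
    ∀ init : Int × Option String, init.1 ≤ (pick f init lks).1 := by
  induction lks with
  | nil => intro init; simp [pick]
  | cons p t ih =>
      intro init
      rw [pick_cons]
      by_cases h : f p > init.1
      · rw [if_pos h]; exact le_trans (le_of_lt h) (ih _)
      · rw [if_neg h]; exact ih _

theorem pick_fst_indep (f : String × List String → Int) (lks : List (String × List String)) :
    ∀ (b : Int) (x y : Option String), (pick f (b, x) lks).1 = (pick f (b, y) lks).1 := by
  induction lks with
  | nil => intro b x y; simp [pick]
  | cons p t ih =>
      intro b x y
      rw [pick_cons, pick_cons]
      by_cases h : f p > b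
      · simp only [if_pos h]
      · simp only [if_neg h]; exact ih b x y

theorem pick_snd_of_update (f : String × List String → Int) (lks : List (String × List String)) :
    ∀ (b : Int) (x y : Option String), b < (pick f (b, x) lks).1 →
      (pick f (b, x) lks).2 = (pick f (b, y) lks).2 := by
  induction lks with
  | nil => intro b x y h; simp [pick] at h
  | cons p t ih =>
      intro b x y h
      rw [pick_cons] at h ⊢
      rw [pick_cons f (b, y) p t]
      by_cases hf : f p > b
      · simp only [if_pos hf]
      · simp only [if_neg hf] at h ⊢
        exact ih b x y h

theorem pick_snd_of_no_update (f : String × List String → Int) (lks : List (String × List String)) :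
    ∀ (b : Int) (x : Option String), (pick f (b, x) lks).1 ≤ b → (pick f (b, x) lks).2 = x := by
  induction lks with
  | nil => intro b x _; simp [pick]
  | cons p t ih =>
      intro b x h
      rw [pick_cons] at h ⊢
      by_cases hf : f p > b
      · rw [if_pos hf] at h
        have := pick_mono f t (f p, some p.1)
        simp at this
        omega
      · rw [if_neg hf] at h ⊢
        exact ih b x h

theorem pick_snd_isSome (f : String × List String → Int) (lks : List (String × List String)) :
    ∀ (b : Int) (v : String), (pick f (b, some v) lks).2.isSome := by
  induction lks with
  | nil => intro b v; simp [pick]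
  | cons p t ih =>
      intro b v
      rw [pick_cons]
      by_cases h : f p > b
      · simp only [if_pos h]; exact ih _ _
      · simp only [if_neg h]; exact ih _ _

-- A's final choice (start −1, fallback on best ≤ 0) equals B's (start 0, fallback on None)
theorem pick_main (f : String × List String → Int) (lks : List (String × List String))
    (hf : ∀ p ∈ lks, 0 ≤ f p) (fb : String) :
    (if (pick f (-1, none) lks).1 ≤ 0 then fb else (pick f (-1, none) lks).2.getD "")
      = (pick f (0, none) lks).2.getD fb := by
  cases lks with
  | nil => simp [pick]
  | cons p t =>
      have hp : 0 ≤ f p := hf p (List.mem_cons_self ..)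
      rw [pick_cons, pick_cons]
      rw [if_pos (by simp; omega : f p > ((-1 : Int), (none : Option String)).1)]
      rcases lt_or_eq_of_le hp with hpos | hzero
      · -- f p > 0: both folds continue from the same state
        rw [if_pos (by simp; omega : f p > ((0 : Int), (none : Option String)).1)]
        have hb : (0 : Int) < (pick f (f p, some p.1) t).1 :=
          lt_of_lt_of_le hpos (pick_mono f t (f p, some p.1))
        rw [if_neg (by omega)]
        obtain ⟨w, hw⟩ := Option.isSome_iff_exists.mp (pick_snd_isSome f t (f p) p.1)
        rw [hw]; rfl
      · -- f p = 0
        rw [if_neg (by simp; omega : ¬ f p > ((0 : Int), (none : Option String)).1), ← hzero]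
        have hfst := pick_fst_indep f t 0 (some p.1) none
        by_cases hb : (0 : Int) < (pick f (0, some p.1) t).1
        · rw [if_neg (by omega)]
          have hb' : (0 : Int) < (pick f (0, none) t).1 := by rw [← hfst]; exact hb
          obtain ⟨w, hw⟩ := Option.isSome_iff_exists.mp (pick_snd_isSome f t 0 p.1)
          rw [pick_snd_of_update f t 0 (some p.1) none hb] at hw
          rw [pick_snd_of_update f t 0 (some p.1) none hb, hw]; rfl
        · have hle : (pick f (0, some p.1) t).1 ≤ 0 := by omega
          rw [if_pos hle]
          have hle' : (pick f (0, none) t).1 ≤ 0 := by rw [← hfst]; exact hle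
          rw [pick_snd_of_no_update f t 0 none hle']
          rfl

-- scores0 = {label: 0}: every lookup with default 0 is 0
theorem getD_zeros (lks : List (String × List String)) :
    ∀ (d : PySem.Dict String Int), (∀ l, d.getD l 0 = 0) →
      ∀ l, (lks.foldl (fun d p => d.insert p.1 (0 : Int)) d).getD l 0 = 0 := by
  induction lks with
  | nil => intro d hd l; exact hd l
  | cons p t ih =>
      intro d hd l
      simp only [List.foldl_cons]
      refine ih _ (fun l' => ?_) l
      rw [PySem.Dict.getD_insert]
      split_ifs with h
      · rfl
      · exact hd l'

-- counting pass: final score = initial + Σ_t count of the label in index[t]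
theorem getD_score_fold (idx : PySem.Dict String (List String)) (ts : List String) :
    ∀ (d : PySem.Dict String Int) (l : String),
      (ts.foldl (fun d t => (idx.getD t []).foldl (fun d lab => d.modify lab 0 (· + 1)) d) d).getD l 0
        = d.getD l 0 + ((ts.map (fun t => ((idx.getD t []).count l : Int))).sum) := by
  induction ts with
  | nil => intro d l; simp
  | cons t ts ih =>
      intro d l
      simp only [List.foldl_cons, List.map_cons, List.sum_cons]
      rw [ih, PySem.Dict.getD_foldl_modify_add_one]
      ring

theorem kwCount_eq_zero (lks : List (String × List String)) (t l : String)
    (h : l ∉ lks.map Prod.fst) : kwCount lks t l = 0 := by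
  induction lks with
  | nil => simp [kwCount]
  | cons p rest ih =>
      simp only [List.map_cons, List.mem_cons, not_or] at h
      simp only [kwCount, List.map_cons, List.sum_cons] at *
      rw [if_neg (fun hc => h.1 hc.symm), ih h.2]

-- one label's keyword loop: how it changes the count of l in index[t]
theorem count_inner (lab t l : String) (kws : List String) :
    ∀ d : PySem.Dict String (List String),
      ((kws.foldl (fun d kw => d.modify kw [] (· ++ [lab])) d).getD t []).count l
        = (d.getD t []).count l + (if lab = l then kws.count t else 0) := by
  induction kws with
  | nil => intro d; simp
  | cons kw kws ih =>
      intro d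
      simp only [List.foldl_cons]
      rw [ih, PySem.Dict.getD_modify, List.count_cons]
      by_cases htk : t = kw
      · subst htk
        rw [if_pos rfl, List.count_append]
        have h1 : List.count l [lab] = if lab = l then 1 else 0 := by
          by_cases h : lab = l <;> simp [h]
        rw [h1]
        simp only [BEq.rfl]
        split_ifs <;> omega
      · rw [if_neg htk]
        have h2 : (kw == t) = false := beq_eq_false_iff_ne.mpr (fun hc => htk hc.symm)
        simp only [h2, Bool.false_eq_true, if_false]
        split_ifs <;> omega

-- index characterization: count of label l in index[t] = kwCount
theorem getD_index_count (lks : List (String × List String)) :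
    ∀ (d : PySem.Dict String (List String)) (t l : String),
      ((lks.foldl (fun d p => p.2.foldl (fun d kw => d.modify kw [] (· ++ [p.1])) d) d).getD t []).count l
        = (d.getD t []).count l + kwCount lks t l := by
  induction lks with
  | nil => intro d t l; simp [kwCount]
  | cons p rest ih =>
      intro d t l
      simp only [List.foldl_cons]
      rw [ih, count_inner p.1 t l p.2 d]
      simp only [kwCount, List.map_cons, List.sum_cons]
      omega

theorem kwCount_of_mem (lks : List (String × List String)) (l : String) (kws : List String)
    (t : String) (hnd : (lks.map Prod.fst).Nodup) (hmem : (l, kws) ∈ lks) :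
    kwCount lks t l = kws.count t := by
  induction lks with
  | nil => simp at hmem
  | cons p rest ih =>
      simp only [List.map_cons, List.nodup_cons] at hnd
      rcases List.mem_cons.mp hmem with heq | hmem'
      · subst heq
        have h0 := kwCount_eq_zero rest t l hnd.1
        simp only [kwCount, List.map_cons, List.sum_cons] at h0 ⊢
        simp [h0]
      · have hl : l ∈ rest.map Prod.fst := List.mem_map.mpr ⟨(l, kws), hmem', rfl⟩
        have hne : p.1 ≠ l := fun hc => hnd.1 (hc ▸ hl)
        have hr := ih hnd.2 hmem'
        simp only [kwCount, List.map_cons, List.sum_cons] at hr ⊢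
        rw [if_neg hne, hr]
        omega

-- double-count swap: Σ_{t ∈ ts} count t kws = Σ_{kw ∈ kws} count kw ts
theorem sum_count_swap (kws ts : List String) :
    ((ts.map (fun t => ((kws.count t : Nat) : Int))).sum)
      = ((kws.map (fun kw => ((ts.count kw : Nat) : Int))).sum) := by
  induction kws with
  | nil => simp
  | cons kw kws ih =>
      simp only [List.map_cons, List.sum_cons]
      have hcons : (ts.map (fun t => (((kw :: kws).count t : Nat) : Int)))
          = (ts.map (fun t => ((kws.count t : Nat) : Int) + if t == kw then 1 else 0)) := by
        apply List.map_congr_left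
        intro t _
        rw [List.count_cons]
        by_cases h : t = kw
        · simp [h]
        · simp [beq_eq_false_iff_ne.mpr (fun hc : kw = t => h hc.symm),
                beq_eq_false_iff_ne.mpr h]
      rw [hcons, PySem.List.sum_map_add_int, ih]
      have hcnt : ((ts.map (fun t => if t == kw then (1 : Int) else 0)).sum) = (ts.count kw : Int) := by
        rw [PySem.List.sum_map_ite_one_zero]
        simp [List.count]
      omega

-- on a Nodup list, count is a membership indicator
theorem count_nodup (ts : List String) (hnd : ts.Nodup) (kw : String) :
    (ts.count kw : Int) = if kw ∈ ts then 1 else 0 := by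
  split_ifs with h
  · exact_mod_cast congrArg Nat.cast (List.count_eq_one_of_mem hnd h)
  · exact_mod_cast congrArg Nat.cast (List.count_eq_zero_of_not_mem h)

-- B's counter score of an initialized label equals A's scan score
theorem score_eq (lks : List (String × List String)) (hnd : (lks.map Prod.fst).Nodup)
    (terms : List String) (l : String) (kws : List String) (hmem : (l, kws) ∈ lks) :
    ((PySem.Set.ofList terms).foldl (fun d t =>
        (((lks.foldl (fun d p => p.2.foldl (fun d kw => d.modify kw [] (· ++ [p.1])) d)
            PySem.Dict.empty).getD t []).foldl (fun d lab => d.modify lab 0 (· + 1)) d))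
      (lks.foldl (fun d p => d.insert p.1 (0 : Int)) PySem.Dict.empty)).getD l 0
      = scoreA terms (l, kws) := by
  rw [getD_score_fold]
  rw [getD_zeros lks PySem.Dict.empty (fun l' => by simp) l, zero_add]
  have hidx : ∀ t : String,
      (((lks.foldl (fun d p => p.2.foldl (fun d kw => d.modify kw [] (· ++ [p.1])) d)
          PySem.Dict.empty).getD t []).count l) = kws.count t := by
    intro t
    rw [getD_index_count lks PySem.Dict.empty t l]
    simp [kwCount_of_mem lks l kws t hnd hmem]
  have hmap : ((PySem.Set.ofList terms).map (fun t =>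
      ((((lks.foldl (fun d p => p.2.foldl (fun d kw => d.modify kw [] (· ++ [p.1])) d)
          PySem.Dict.empty).getD t []).count l : Nat) : Int))).sum
      = (((PySem.Set.ofList terms).map (fun t => ((kws.count t : Nat) : Int))).sum) := by
    congr 1
    apply List.map_congr_left
    intro t _
    exact_mod_cast congrArg Nat.cast (hidx t)
  rw [hmap, sum_count_swap]
  have hind : (kws.map (fun kw => (((PySem.Set.ofList terms).count kw : Nat) : Int)))
      = kws.map (fun kw => if terms.contains kw then (1 : Int) else 0) := by
    apply List.map_congr_left
    intro kw _
    rw [count_nodup (PySem.Set.ofList terms) (PySem.Set.nodup_ofList terms) kw]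
    have : kw ∈ PySem.Set.ofList terms ↔ terms.contains kw = true := by
      rw [PySem.Set.mem_ofList]; exact (List.contains_iff_mem).symm
    split_ifs with h1 h2 <;> simp_all
  rw [hind]
  unfold scoreA
  rw [PySem.List.sum_map_ite_one_zero, PySem.List.foldl_if_add_one]
  simp

theorem scoreA_nonneg (terms : List String) (p : String × List String) : 0 ≤ scoreA terms p := by
  unfold scoreA
  rw [PySem.List.foldl_if_add_one]
  positivity

-- per-cluster: the string A inserts equals the string B inserts
theorem cell_eq (lks : List (String × List String)) (hnd : (lks.map Prod.fst).Nodup)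
    (terms : List String) (fb : String) :
    (if (pick (scoreA terms) (-1, none) lks).1 ≤ 0 then fb
       else (pick (scoreA terms) (-1, none) lks).2.getD "")
      = (pick (fun p =>
          ((PySem.Set.ofList terms).foldl (fun d t =>
              (((lks.foldl (fun d p => p.2.foldl (fun d kw => d.modify kw [] (· ++ [p.1])) d)
                  PySem.Dict.empty).getD t []).foldl (fun d lab => d.modify lab 0 (· + 1)) d))
            (lks.foldl (fun d p => d.insert p.1 (0 : Int)) PySem.Dict.empty)).getD p.1 0)
          (0, none) lks).2.getD fb := by
  have hcongr : pick (fun p =>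
      ((PySem.Set.ofList terms).foldl (fun d t =>
          (((lks.foldl (fun d p => p.2.foldl (fun d kw => d.modify kw [] (· ++ [p.1])) d)
              PySem.Dict.empty).getD t []).foldl (fun d lab => d.modify lab 0 (· + 1)) d))
        (lks.foldl (fun d p => d.insert p.1 (0 : Int)) PySem.Dict.empty)).getD p.1 0)
      (0, none) lks = pick (scoreA terms) (0, none) lks := by
    unfold pick
    apply PySem.List.foldl_congr_mem
    intro bs p hp
    obtain ⟨l, kws⟩ := p
    have hs := score_eq lks hnd terms l kws (by simpa using hp)
    simp only [hs]
  rw [hcongr]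
  exact pick_main (scoreA terms) lks (fun p _ => scoreA_nonneg terms p) fb

-- ===== VERDICT (by name: the statement is the Claim_ definition above) =====
theorem auto_label_clusters_spec : Claim_equal_auto_label_clusters := by
  intro cts lks fp _ hpre
  unfold Spec_auto_label_clusters auto_label_clusters auto_label_clusters_alt
  congr 1
  apply PySem.List.foldl_congr_mem
  intro labels ct hct
  have h := cell_eq lks hpre (ct.2.map (fun p => PySem.Str.lower p.1))
    (fp ++ " " ++ PySem.Int.toStr ct.1)
  simp only [pick, scoreA] at h
  simp only []
  rw [← h]
  split_ifs <;> rfl
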